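-- pv_equiv track=rewrite | github.com/davidaray/curation_templates | modify_fasta.py | modify_headers
-- ===== SOURCE A (Python) =====
-- def modify_headers(SEQUENCES, HEADERS_LIST, NEW_TEXT):
--     """Modify headers by replacing the part after '#' with NEW_TEXT."""
--     MODIFIED_SEQUENCES = {}
--     for HEADER, SEQ in SEQUENCES.items():
--         for OLD_HEADER in HEADERS_LIST:
--             if OLD_HEADER in HEADER:
--                 NEW_HEADER = HEADER.split('#')[0] + f"#{NEW_TEXT}"
--                 MODIFIED_SEQUENCES[NEW_HEADER] = SEQ
--                 break
--         else:
--             MODIFIED_SEQUENCES[HEADER] = SEQ  # No change if HEADER not found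
--     return MODIFIED_SEQUENCES
-- ===== SOURCE B (Python) =====
-- def modify_headers(SEQUENCES, HEADERS_LIST, NEW_TEXT):
--     """Modify headers by replacing the part after '#' with NEW_TEXT.
--
--     Two-phase: first collect the set of headers hit by any pattern
--     (pattern-outer scan), then rebuild the dict in one pass."""
--     matched = set()
--     for pat in HEADERS_LIST:
--         for h in SEQUENCES:
--             if pat in h:
--                 matched.add(h)
--     suffix = "#" + NEW_TEXT
--     out = {}
--     for h, s in SEQUENCES.items():
--         out[h.split("#")[0] + suffix if h in matched else h] = s
--     return out
-- ===== Notes on version B (the rewrite author's own statement) =====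
-- stated objective: alternative
-- what changed: A interleaves a per-header break-loop over the patterns with dict building; B first computes the set of matched headers in a separate pattern-outer scan and then rebuilds the dict in one pass with a simple membership test.
import Mathlib
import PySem

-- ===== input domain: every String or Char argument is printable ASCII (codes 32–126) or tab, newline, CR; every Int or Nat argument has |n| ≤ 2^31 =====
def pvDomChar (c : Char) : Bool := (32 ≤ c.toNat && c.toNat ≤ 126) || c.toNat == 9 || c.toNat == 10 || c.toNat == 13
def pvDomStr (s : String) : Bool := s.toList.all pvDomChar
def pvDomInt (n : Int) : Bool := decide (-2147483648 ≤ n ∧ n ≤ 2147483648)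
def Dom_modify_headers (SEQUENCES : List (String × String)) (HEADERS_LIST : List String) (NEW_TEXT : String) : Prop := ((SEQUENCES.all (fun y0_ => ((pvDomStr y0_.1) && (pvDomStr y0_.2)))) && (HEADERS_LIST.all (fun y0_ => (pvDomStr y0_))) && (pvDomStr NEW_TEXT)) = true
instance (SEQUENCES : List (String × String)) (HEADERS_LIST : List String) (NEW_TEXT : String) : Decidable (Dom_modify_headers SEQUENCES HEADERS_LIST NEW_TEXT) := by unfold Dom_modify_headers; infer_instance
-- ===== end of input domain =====

-- B replaces A's per-header break-loop over the patterns (interleaved with dict building)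
-- by a separate pattern-outer scan that collects the set of matched headers, then one
-- dict-building pass with a membership test; objective: alternative structure, same cost.

-- ===== PORT A =====
-- A's inner 'for OLD_HEADER in HEADERS_LIST: … break / else:' loop, acting on the dict M.
-- HEADER.split('#')[0]: splitOn with a nonempty separator always returns a nonempty list,
-- so Python's [0] never raises; headD "" is exact here.
def pvAInner (M : PySem.Dict String String) (HEADER SEQ NEW_TEXT : String) :
    List String → PySem.Dict String String
  | [] => M.insert HEADER SEQ                      -- for/else branch: no change
  | OLD_HEADER :: rest =>
      if PySem.Str.isIn OLD_HEADER HEADER then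
        M.insert (String.ofList ((PySem.Chars.splitOn HEADER.toList ['#']).headD []) ++ "#" ++ NEW_TEXT) SEQ
      else pvAInner M HEADER SEQ NEW_TEXT rest

def modify_headers (SEQUENCES : List (String × String)) (HEADERS_LIST : List String) (NEW_TEXT : String) : List (String × String) :=
  (SEQUENCES.foldl
    (fun (M : PySem.Dict String String) hs =>
      pvAInner M hs.1 hs.2 NEW_TEXT HEADERS_LIST)
    PySem.Dict.empty).items

-- ===== PORT B =====
def modify_headers_alt (SEQUENCES : List (String × String)) (HEADERS_LIST : List String) (NEW_TEXT : String) : List (String × String) :=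
  let matched : PySem.Set String :=
    HEADERS_LIST.foldl
      (fun m pat =>
        SEQUENCES.foldl
          (fun m hs => if PySem.Str.isIn pat hs.1 then PySem.Set.add m hs.1 else m) m)
      PySem.Set.empty
  let suffix := "#" ++ NEW_TEXT
  (SEQUENCES.foldl
    (fun (M : PySem.Dict String String) hs =>
      M.insert
        (if PySem.Set.contains matched hs.1 then
          String.ofList ((PySem.Chars.splitOn hs.1.toList ['#']).headD []) ++ suffix
         else hs.1) hs.2)
    PySem.Dict.empty).items

-- ===== PRECONDITION & SPEC =====
def Spec_modify_headers (SEQUENCES : List (String × String)) (HEADERS_LIST : List String) (NEW_TEXT : String) (out : List (String × String)) : Prop := out = modify_headers_alt SEQUENCES HEADERS_LIST NEW_TEXT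
instance (SEQUENCES : List (String × String)) (HEADERS_LIST : List String) (NEW_TEXT : String) (out : List (String × String)) : Decidable (Spec_modify_headers SEQUENCES HEADERS_LIST NEW_TEXT out) := by unfold Spec_modify_headers; infer_instance

-- ===== CLAIM (what is proved, stated in full; the proofs are below) =====
def Claim_equal_modify_headers : Prop := ∀ (SEQUENCES : List (String × String)) (HEADERS_LIST : List String) (NEW_TEXT : String), Dom_modify_headers SEQUENCES HEADERS_LIST NEW_TEXT → Spec_modify_headers SEQUENCES HEADERS_LIST NEW_TEXT (modify_headers SEQUENCES HEADERS_LIST NEW_TEXT)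

-- ===== LEMMAS AND PROOFS =====

-- A's break-loop inserts the replaced header iff some pattern matches.
theorem pvAInner_eq (M : PySem.Dict String String) (HEADER SEQ NEW_TEXT : String)
    (L : List String) :
    pvAInner M HEADER SEQ NEW_TEXT L =
      M.insert
        (if L.any (fun p => PySem.Str.isIn p HEADER) then
          String.ofList ((PySem.Chars.splitOn HEADER.toList ['#']).headD []) ++ ("#" ++ NEW_TEXT)
         else HEADER) SEQ := by
  induction L with
  | nil => simp [pvAInner]
  | cons p rest ih =>
      simp only [pvAInner, List.any_cons]
      by_cases h : PySem.Chars.isIn p.toList HEADER.toList = true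
      · simp [h, String.append_assoc]
      · simp [h, ih]

-- Membership in B's matched set: exactly the headers of SEQUENCES hit by some pattern.
theorem pv_mem_inner (SEQUENCES : List (String × String)) (pat : String)
    (m : PySem.Set String) (x : String) :
    x ∈ SEQUENCES.foldl
        (fun m hs => if PySem.Str.isIn pat hs.1 then PySem.Set.add m hs.1 else m) m ↔
      x ∈ m ∨ ∃ hs ∈ SEQUENCES, PySem.Str.isIn pat hs.1 ∧ x = hs.1 := by
  induction SEQUENCES generalizing m with
  | nil => simp
  | cons hs rest ih =>
      simp only [List.foldl_cons, ih, List.exists_mem_cons_iff]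
      by_cases h : PySem.Chars.isIn pat.toList hs.1.toList = true
      · simp [h, PySem.Set.mem_add, or_assoc]
      · simp [h]

theorem pv_mem_matched (SEQUENCES : List (String × String)) (HEADERS_LIST : List String)
    (m : PySem.Set String) (x : String) :
    x ∈ HEADERS_LIST.foldl
        (fun m pat =>
          SEQUENCES.foldl
            (fun m hs => if PySem.Str.isIn pat hs.1 then PySem.Set.add m hs.1 else m) m)
        m ↔
      x ∈ m ∨ ∃ pat ∈ HEADERS_LIST, ∃ hs ∈ SEQUENCES, PySem.Str.isIn pat hs.1 ∧ x = hs.1 := by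
  induction HEADERS_LIST generalizing m with
  | nil => simp
  | cons pat rest ih =>
      simp only [List.foldl_cons, ih, pv_mem_inner, List.exists_mem_cons_iff]
      rw [or_assoc]

theorem modify_headers_spec : Claim_equal_modify_headers := by
  intro SEQUENCES HEADERS_LIST NEW_TEXT _
  unfold Spec_modify_headers modify_headers modify_headers_alt
  simp only
  congr 1
  apply PySem.List.foldl_congr_mem
  intro M hs hmem
  rw [pvAInner_eq]
  congr 1
  have hcontains :
      PySem.Set.contains
        (HEADERS_LIST.foldl
          (fun m pat =>
            SEQUENCES.foldl
              (fun m hs => if PySem.Str.isIn pat hs.1 then PySem.Set.add m hs.1 else m) m)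
          PySem.Set.empty) hs.1 =
        HEADERS_LIST.any (fun p => PySem.Str.isIn p hs.1) := by
    apply Bool.eq_iff_iff.mpr
    rw [PySem.Set.contains_iff, pv_mem_matched, List.any_eq_true]
    constructor
    · rintro (habs | ⟨pat, hpat, hs', _, hin, heq⟩)
      · exact absurd habs (List.not_mem_nil)
      · exact ⟨pat, hpat, heq ▸ hin⟩
    · rintro ⟨p, hp, hin⟩
      exact Or.inr ⟨p, hp, hs, hmem, hin, rfl⟩
  rw [hcontains]
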